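-- pv_equiv track=rewrite | github.com/okmd/leetcode | greedy/lb-07-lru-cache.py | use_ll_and_dict
-- ===== SOURCE A (Python) =====
-- class Node:
--     def __init__(self, val, n=None, p=None):
--         self.val = val
--         self.next = n
--         self.prev = p
--
-- def use_ll_and_dict(arr, c):
--     present_in_window = dict() # contains the node address
--     head = None
--     tail = None
--     fault = 0
--     curr_len = 0
--     for ele in arr:
--         node = present_in_window.get(ele, None)
--         if node:
--             ## present in the map hence get address from here,
--             # and re-arrange the links to make most recent,
--             # delete from its location and inser at the tail
--             # as the node is present hence at-least head is present
--             # if it is tail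
--             if node.next == None:
--                 continue
--             #if it is head
--             elif node.prev==None:
--                 node.next.prev = None
--                 head = node.next
--                 # tail.next = node
--                 # node.prev = tail
--                 # tail = node
--                 # tail.next = None
--             else:
--                 node.prev.next = node.next # if it is head
--                 node.next.prev = node.prev
--             tail.next = node
--             node.prev = tail
--             tail = node
--             tail.next = None
--         else:
--             # not present in the cache hence add at the end
--             if not head:
--                 head = Node(ele)
--                 tail = head
--                 curr_len+=1
--             elif curr_len < c:
--                 temp = Node(ele)
--                 tail.next = temp
--                 tail.next.prev = tail
--                 tail = temp
--                 curr_len += 1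
--             else:
--                 # not present and cache is full
--                 # remove from head and insert at the tail
--                 del present_in_window[head.val]
--                 head.next.prev = None
--                 head = head.next
--                 tail.next = Node(ele)
--                 tail.next.prev = tail
--                 tail = tail.next
--             present_in_window[ele] = tail
--             fault += 1
--     return fault
-- ===== SOURCE B (Python) =====
-- def use_ll_and_dict(arr, c):
--     # LRU page-fault count via a plain recency list (least recent first).
--     cap = c if c > 1 else 1   # the first access is always admitted, so effective capacity >= 1
--     cache = []
--     fault = 0
--     for ele in arr:
--         if ele in cache:
--             cache.remove(ele)          # refresh: move to most-recent slot
--             cache.append(ele)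
--         else:
--             fault += 1
--             if len(cache) >= cap:
--                 cache.pop(0)           # evict the least recently used
--             cache.append(ele)
--     return fault
-- ===== Notes on version B (the rewrite author's own statement) =====
-- stated objective: simpler
-- what changed: Replaces A's hand-rolled doubly-linked list with node mutation plus a dict of node addresses by a single plain recency-ordered list of keys with one branch per access.
import Mathlib
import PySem

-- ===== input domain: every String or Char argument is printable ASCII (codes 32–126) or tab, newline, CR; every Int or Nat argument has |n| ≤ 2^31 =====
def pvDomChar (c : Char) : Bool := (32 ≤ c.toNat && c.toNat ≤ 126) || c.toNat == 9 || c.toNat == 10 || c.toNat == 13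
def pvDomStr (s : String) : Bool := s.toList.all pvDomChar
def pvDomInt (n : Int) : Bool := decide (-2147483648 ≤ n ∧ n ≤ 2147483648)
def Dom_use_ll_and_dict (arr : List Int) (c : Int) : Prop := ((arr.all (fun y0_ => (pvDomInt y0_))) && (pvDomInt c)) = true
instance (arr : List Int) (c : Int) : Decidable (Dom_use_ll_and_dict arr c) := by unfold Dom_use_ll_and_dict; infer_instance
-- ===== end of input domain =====

-- B replaces A's doubly-linked list + dict-of-nodes by one plain recency-ordered key list (simpler; equal return values on Pre_).

-- ===== PORT A =====
-- Python A mutates a doubly-linked list of Node objects and keeps a dict from value to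
-- node address. PySem has no mutable references, so the linked list is modelled by the
-- list of its node values in head→tail order; this is exact because the window's values
-- are the dict's keys, hence pairwise distinct, so a value identifies its node:
-- `node.next == None` ⇔ ele is the last value, `node.prev == None` ⇔ ele is the first,
-- and the pointer surgeries are the corresponding list surgeries. The dict (whose stored
-- node addresses Python only tests for presence via `if node:`) is kept as a PySem.Dict
-- with unit values. On the inputs excluded by Pre_ below Python A raises on the
-- eviction branch (head.next is None); the port's value there is not claimed.
def use_ll_and_dict_loop (c : Int) (present : PySem.Dict Int Unit) (window : List Int)
    (fault curr_len : Int) : List Int → Int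
  | [] => fault
  | ele :: rest =>
    if (present.get? ele).isSome then               -- `if node:`
      if window.getLast? = some ele then            -- `node.next == None`: continue
        use_ll_and_dict_loop c present window fault curr_len rest
      else if window.head? = some ele then          -- `node.prev == None`: unlink head, re-append at tail
        use_ll_and_dict_loop c present (window.tail ++ [ele]) fault curr_len rest
      else                                          -- unlink from the middle, re-append at tail
        use_ll_and_dict_loop c present (window.erase ele ++ [ele]) fault curr_len rest
    else
      if window = [] then                           -- `if not head:`
        use_ll_and_dict_loop c (present.insert ele ()) [ele] (fault + 1) (curr_len + 1) rest
      else if curr_len < c then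
        use_ll_and_dict_loop c (present.insert ele ()) (window ++ [ele]) (fault + 1) (curr_len + 1) rest
      else                                          -- `del present_in_window[head.val]`, drop head, append
        use_ll_and_dict_loop c ((present.erase (window.headD 0)).insert ele ())
          (window.tail ++ [ele]) (fault + 1) curr_len rest

def use_ll_and_dict (arr : List Int) (c : Int) : Int :=
  use_ll_and_dict_loop c PySem.Dict.empty [] 0 0 arr

-- ===== PORT B =====
-- `cache.remove ele` is List.erase (exact: ele ∈ cache was just checked);
-- `cache.pop(0)` is List.tail (exact: len(cache) ≥ cap ≥ 1 there).
def use_ll_and_dict_alt_loop (cap : Int) (cache : List Int) (fault : Int) : List Int → Int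
  | [] => fault
  | ele :: rest =>
    if ele ∈ cache then
      use_ll_and_dict_alt_loop cap (cache.erase ele ++ [ele]) fault rest
    else if cap ≤ (cache.length : Int) then
      use_ll_and_dict_alt_loop cap (cache.tail ++ [ele]) (fault + 1) rest
    else
      use_ll_and_dict_alt_loop cap (cache ++ [ele]) (fault + 1) rest

def use_ll_and_dict_alt (arr : List Int) (c : Int) : Int :=
  use_ll_and_dict_alt_loop (if 1 < c then c else 1) [] 0 arr

-- ===== PRECONDITION & SPEC =====
-- Pre_ excludes exactly the inputs on which Python A raises AttributeError: with c ≤ 1,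
-- the first access to a value distinct from the one cached forces an eviction from a
-- one-node linked list and A dereferences head.next, which is None.
def Pre_use_ll_and_dict (arr : List Int) (c : Int) : Prop :=
  2 ≤ c ∨ ∀ x ∈ arr, ∀ y ∈ arr, x = y
instance (arr : List Int) (c : Int) : Decidable (Pre_use_ll_and_dict arr c) := by
  unfold Pre_use_ll_and_dict; infer_instance
def pvWitness_use_ll_and_dict : List Int × Int := ([1, 2, 1, 3], 2)

def Spec_use_ll_and_dict (arr : List Int) (c : Int) (out : Int) : Prop := out = use_ll_and_dict_alt arr c
instance (arr : List Int) (c : Int) (out : Int) : Decidable (Spec_use_ll_and_dict arr c out) := by unfold Spec_use_ll_and_dict; infer_instance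

-- ===== CLAIM (what is proved, stated in full; the proofs are below) =====
def Claim_equal_use_ll_and_dict : Prop := ∀ (arr : List Int) (c : Int), Dom_use_ll_and_dict arr c → Pre_use_ll_and_dict arr c → Spec_use_ll_and_dict arr c (use_ll_and_dict arr c)

-- ===== LEMMAS AND PROOFS =====

lemma find?_filter_ne (rest : List (Int × Unit)) (k x : Int) (h : x ≠ k) :
    List.find? (fun p => p.1 == x) (rest.filter (fun p => !(p.1 == k)))
      = List.find? (fun p => p.1 == x) rest := by
  have hkx : (k == x) = false := by simp; exact Ne.symm h
  induction rest with
  | nil => rfl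
  | cons p rest ih =>
    by_cases hk : p.1 = k
    · simp [List.filter_cons, hk, List.find?_cons, hkx, ih]
    · by_cases hx : p.1 = x <;> simp [List.filter_cons, hk, List.find?_cons, hx, ih, h]

lemma find?_filter_self (rest : List (Int × Unit)) (k : Int) :
    List.find? (fun p => p.1 == k) (rest.filter (fun p => !(p.1 == k))) = none := by
  induction rest with
  | nil => rfl
  | cons p rest ih =>
    by_cases hk : p.1 = k <;> simp [List.filter_cons, hk, List.find?_cons, ih]

lemma dict_get?_erase_ne (d : PySem.Dict Int Unit) (k x : Int) (h : x ≠ k) :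
    (d.erase k).get? x = d.get? x := by
  cases d with | mk items =>
  show Option.map _ (List.find? _ (items.filter _)) = _
  rw [find?_filter_ne items k x h]; rfl

lemma dict_get?_erase_self (d : PySem.Dict Int Unit) (k : Int) :
    (d.erase k).get? k = none := by
  cases d with | mk items =>
  show Option.map _ (List.find? _ (items.filter _)) = _
  rw [find?_filter_self items k]; rfl

lemma erase_append_of_getLast (w : List Int) (a : Int) (hn : w.Nodup)
    (hl : w.getLast? = some a) : w.erase a ++ [a] = w := by
  rcases List.getLast?_eq_some_iff.mp hl with ⟨w', rfl⟩
  have ha : a ∉ w' := by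
    have := hn; simp [List.nodup_append] at this; tauto
  rw [List.erase_append_right _ ha]
  simp

lemma loop_eq (c : Int) (hc : 2 ≤ c) :
    ∀ (arr : List Int) (present : PySem.Dict Int Unit) (window : List Int) (fault : Int),
      window.Nodup → (window.length : Int) ≤ c →
      (∀ x : Int, (present.get? x).isSome ↔ x ∈ window) →
      use_ll_and_dict_loop c present window fault (window.length : Int) arr
        = use_ll_and_dict_alt_loop c window fault arr := by
  intro arr
  induction arr with
  | nil => intro present window fault _ _ _; rfl
  | cons ele rest ih =>
    intro present window fault hnd hlen hmem
    by_cases hin : ele ∈ window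
    · have hsome : (present.get? ele).isSome := (hmem ele).mpr hin
      have hperm : (window.erase ele ++ [ele]).Perm window :=
        (List.perm_append_singleton _ _).trans (List.perm_cons_erase hin).symm
      have hkey : use_ll_and_dict_loop c present window fault (window.length : Int) (ele :: rest)
          = use_ll_and_dict_loop c present (window.erase ele ++ [ele]) fault (window.length : Int) rest := by
        simp only [use_ll_and_dict_loop, hsome, if_pos]
        by_cases hlast : window.getLast? = some ele
        · rw [if_pos hlast, erase_append_of_getLast window ele hnd hlast]
        · rw [if_neg hlast]
          by_cases hhead : window.head? = some ele
          · rw [if_pos hhead]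
            obtain ⟨t, rfl⟩ : ∃ t, window = ele :: t := by
              cases window with
              | nil => simp at hhead
              | cons w ws => simp at hhead; exact ⟨ws, by rw [hhead]⟩
            simp [List.erase_cons_head]
          · rw [if_neg hhead]
      have hB : use_ll_and_dict_alt_loop c window fault (ele :: rest)
          = use_ll_and_dict_alt_loop c (window.erase ele ++ [ele]) fault rest := by
        simp only [use_ll_and_dict_alt_loop, hin, if_pos]
      rw [hkey, hB]
      have hlen2 : (window.erase ele ++ [ele]).length = window.length := hperm.length_eq
      have := ih present (window.erase ele ++ [ele]) fault (hperm.nodup_iff.mpr hnd)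
        (by rw [hlen2]; exact hlen)
        (fun x => (hmem x).trans hperm.mem_iff.symm)
      rw [hlen2] at this
      exact this
    · have hnotsome : ¬ ((present.get? ele).isSome = true) := fun h => hin ((hmem ele).mp h)
      by_cases hempty : window = []
      · subst hempty
        have hA : use_ll_and_dict_loop c present [] fault (([] : List Int).length : Int) (ele :: rest)
            = use_ll_and_dict_loop c (present.insert ele ()) [ele] (fault + 1) (([ele] : List Int).length : Int) rest := by
          simp only [use_ll_and_dict_loop, hnotsome, if_neg, if_pos, List.length_nil, List.length_cons]
          norm_num
        have hB : use_ll_and_dict_alt_loop c [] fault (ele :: rest)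
            = use_ll_and_dict_alt_loop c [ele] (fault + 1) rest := by
          have : ¬ (c ≤ (([] : List Int).length : Int)) := by simp; omega
          simp only [use_ll_and_dict_alt_loop, List.not_mem_nil, if_neg, this, List.nil_append]
          simp
        rw [hA, hB]
        refine ih _ _ _ (by simp) (by simp; omega) ?_
        intro x
        rw [PySem.Dict.get?_insert]
        by_cases hx : x = ele <;> simp [hx, hmem x]
      · by_cases hlt : (window.length : Int) < c
        · have hA : use_ll_and_dict_loop c present window fault (window.length : Int) (ele :: rest)
              = use_ll_and_dict_loop c (present.insert ele ()) (window ++ [ele]) (fault + 1) ((window ++ [ele]).length : Int) rest := by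
            simp only [use_ll_and_dict_loop, hnotsome, if_neg, hempty, hlt, if_pos, List.length_append, List.length_cons, List.length_nil]
            push_cast; ring_nf
          have hB : use_ll_and_dict_alt_loop c window fault (ele :: rest)
              = use_ll_and_dict_alt_loop c (window ++ [ele]) (fault + 1) rest := by
            have h2 : ¬ (c ≤ (window.length : Int)) := by omega
            simp [use_ll_and_dict_alt_loop, hin, h2]
          rw [hA, hB]
          refine ih _ _ _ ?_ ?_ ?_
          · simp [List.nodup_append, hnd]
            exact fun a ha he => hin (he ▸ ha)
          · simp only [List.length_append, List.length_cons, List.length_nil]; push_cast; omega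
          · intro x
            rw [PySem.Dict.get?_insert]
            by_cases hx : x = ele <;> simp [hx, hmem x]
        · obtain ⟨h, t, rfl⟩ : ∃ h t, window = h :: t := by
            cases window with
            | nil => exact absurd rfl hempty
            | cons h t => exact ⟨h, t, rfl⟩
          have hA : use_ll_and_dict_loop c present (h :: t) fault (((h :: t).length : Int)) (ele :: rest)
              = use_ll_and_dict_loop c ((present.erase h).insert ele ()) (t ++ [ele]) (fault + 1) (((t ++ [ele]).length : Int)) rest := by
            simp only [use_ll_and_dict_loop, hnotsome, if_neg, hempty, hlt, List.headD_cons, List.tail_cons]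
            rw [show (((h :: t).length : Int)) = (((t ++ [ele]).length : Int)) from by simp]
            simp
          have hB : use_ll_and_dict_alt_loop c (h :: t) fault (ele :: rest)
              = use_ll_and_dict_alt_loop c (t ++ [ele]) (fault + 1) rest := by
            have h2 : c ≤ ((h :: t).length : Int) := by omega
            simp only [use_ll_and_dict_alt_loop, hin, if_neg, h2, if_pos, List.tail_cons]
            simp [h2]
          rw [hA, hB]
          have hne : h ∉ t ∧ t.Nodup := by simpa using hnd
          refine ih _ _ _ ?_ ?_ ?_
          · have het : ele ∉ t := fun ht => hin (List.mem_cons_of_mem _ ht)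
            simp [List.nodup_append, hne.2]
            exact fun a ha he => het (he ▸ ha)
          · simp at hlen ⊢; push_cast at hlen ⊢; omega
          · intro x
            rw [PySem.Dict.get?_insert]
            by_cases hx : x = ele
            · simp [hx]
            · by_cases hxh : x = h
              · subst hxh
                simp [dict_get?_erase_self, hx, hne.1]
              · rw [if_neg hx, dict_get?_erase_ne _ _ _ hxh]
                have := hmem x
                simp [hxh, hx] at this ⊢
                exact this


-- the all-equal case (any c): after its first access each loop caches exactly [a] and
-- every later access of a is a hit on the single (hence last) node, changing nothing.
lemma loopA_const (c a : Int) (present : PySem.Dict Int Unit)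
    (hp : (present.get? a).isSome) :
    ∀ (arr : List Int), (∀ x ∈ arr, x = a) → ∀ (fault curr_len : Int),
      use_ll_and_dict_loop c present [a] fault curr_len arr = fault := by
  intro arr
  induction arr with
  | nil => intro _ fault curr_len; rfl
  | cons x rest ih =>
    intro hall fault curr_len
    have hx : x = a := hall x (by simp)
    subst hx
    have hlast : ([x] : List Int).getLast? = some x := rfl
    simp only [use_ll_and_dict_loop, hp, hlast, if_pos]
    exact ih (fun y hy => hall y (by simp [hy])) fault curr_len

lemma loopB_const (cap a : Int) :
    ∀ (arr : List Int), (∀ x ∈ arr, x = a) → ∀ (fault : Int),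
      use_ll_and_dict_alt_loop cap [a] fault arr = fault := by
  intro arr
  induction arr with
  | nil => intro _ fault; rfl
  | cons x rest ih =>
    intro hall fault
    have hx : x = a := hall x (by simp)
    subst hx
    simp only [use_ll_and_dict_alt_loop, List.mem_singleton, if_pos, List.erase_cons_head,
      List.nil_append]
    exact ih (fun y hy => hall y (by simp [hy])) fault


-- ===== VERDICT (by name: the statement is the Claim_ definition above) =====
theorem use_ll_and_dict_spec : Claim_equal_use_ll_and_dict := by
  intro arr c _ hpre
  unfold Spec_use_ll_and_dict use_ll_and_dict use_ll_and_dict_alt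
  rcases hpre with hc | hall
  · rw [if_pos (by omega : (1:Int) < c)]
    have := loop_eq c hc arr PySem.Dict.empty [] 0 (by simp) (by simp; omega)
      (by intro x; simp [PySem.Dict.get?_empty])
    simpa using this
  · cases arr with
    | nil => rfl
    | cons b rest =>
      have hrest : ∀ x ∈ rest, x = b := fun x hx => hall x (by simp [hx]) b (by simp)
      have hcap : ¬ ((if (1:Int) < c then c else 1) ≤ ((([] : List Int).length : Int))) := by
        split_ifs <;> simp <;> omega
      have hA : use_ll_and_dict_loop c PySem.Dict.empty [] 0 0 (b :: rest)
          = use_ll_and_dict_loop c (PySem.Dict.empty.insert b ()) [b] 1 1 rest := by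
        norm_num [use_ll_and_dict_loop, PySem.Dict.get?_empty]
      have hB : use_ll_and_dict_alt_loop (if (1:Int) < c then c else 1) [] 0 (b :: rest)
          = use_ll_and_dict_alt_loop (if (1:Int) < c then c else 1) [b] 1 rest := by
        norm_num [use_ll_and_dict_alt_loop, hcap]
      rw [hA, hB, loopA_const c b _ (by rw [PySem.Dict.get?_insert_self]; rfl) rest hrest,
        loopB_const _ b rest hrest]
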